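-- pv_equiv track=rewrite | github.com/ryan96db/RosalindSolutions | infer_rna_from_protein.py | possible_codons
-- ===== SOURCE A (Python) =====
-- def possible_codons(protein):
--     possible_codons = []
--     amino_acids = {
--         'AUA':'I', 'AUC':'I', 'AUU':'I', 'AUG':'M',
--         'ACA':'T', 'ACC':'T', 'ACG':'T', 'ACU':'T',
--         'AAC':'N', 'AAU':'N', 'AAA':'K', 'AAG':'K',
--         'AGC':'S', 'AGU':'S', 'AGA':'R', 'AGG':'R',
--         'CUA':'L', 'CUC':'L', 'CUG':'L', 'CUU':'L',
--         'CCA':'P', 'CCC':'P', 'CCG':'P', 'CCU':'P',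
--         'CAC':'H', 'CAU':'H', 'CAA':'Q', 'CAG':'Q',
--         'CGA':'R', 'CGC':'R', 'CGG':'R', 'CGU':'R',
--         'GUA':'V', 'GUC':'V', 'GUG':'V', 'GUU':'V',
--         'GCA':'A', 'GCC':'A', 'GCG':'A', 'GCU':'A',
--         'GAC':'D', 'GAU':'D', 'GAA':'E', 'GAG':'E',
--         'GGA':'G', 'GGC':'G', 'GGG':'G', 'GGU':'G',
--         'UCA':'S', 'UCC':'S', 'UCG':'S', 'UCU':'S',
--         'UUC':'F', 'UUU':'F', 'UUA':'L', 'UUG':'L',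
--         'UAC':'Y', 'UAU':'Y', 'UAA':'', 'UAG':'',
--         'UGC':'C', 'UGU':'C', 'UGA':'', 'UGG':'W',
--     }
--
--     for aa in protein:
--         for k, v in amino_acids.items():
--             if v == aa:
--                 possible_codons.append(k)
--     return possible_codons
-- ===== SOURCE B (Python) =====
-- # Reverse table: amino acid -> codons, in the order the original codon table lists them.
-- CODONS_FOR = {
--     'I': ['AUA', 'AUC', 'AUU'], 'M': ['AUG'],
--     'T': ['ACA', 'ACC', 'ACG', 'ACU'], 'N': ['AAC', 'AAU'],
--     'K': ['AAA', 'AAG'], 'S': ['AGC', 'AGU', 'UCA', 'UCC', 'UCG', 'UCU'],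
--     'R': ['AGA', 'AGG', 'CGA', 'CGC', 'CGG', 'CGU'],
--     'L': ['CUA', 'CUC', 'CUG', 'CUU', 'UUA', 'UUG'],
--     'P': ['CCA', 'CCC', 'CCG', 'CCU'], 'H': ['CAC', 'CAU'],
--     'Q': ['CAA', 'CAG'], 'V': ['GUA', 'GUC', 'GUG', 'GUU'],
--     'A': ['GCA', 'GCC', 'GCG', 'GCU'], 'D': ['GAC', 'GAU'],
--     'E': ['GAA', 'GAG'], 'G': ['GGA', 'GGC', 'GGG', 'GGU'],
--     'F': ['UUC', 'UUU'], 'Y': ['UAC', 'UAU'],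
--     'C': ['UGC', 'UGU'], 'W': ['UGG'],
-- }
--
-- def possible_codons(protein):
--     return [codon for aa in protein for codon in CODONS_FOR.get(aa, [])]
-- ===== Notes on version B (the rewrite author's own statement) =====
-- stated objective: faster
-- what changed: B replaces A's per-character rescan of the 64-entry codon table with a hard-coded reverse table (amino acid -> codons, in the original table's order) and a single dict lookup per character, emitted via one flat comprehension.
import Mathlib
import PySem

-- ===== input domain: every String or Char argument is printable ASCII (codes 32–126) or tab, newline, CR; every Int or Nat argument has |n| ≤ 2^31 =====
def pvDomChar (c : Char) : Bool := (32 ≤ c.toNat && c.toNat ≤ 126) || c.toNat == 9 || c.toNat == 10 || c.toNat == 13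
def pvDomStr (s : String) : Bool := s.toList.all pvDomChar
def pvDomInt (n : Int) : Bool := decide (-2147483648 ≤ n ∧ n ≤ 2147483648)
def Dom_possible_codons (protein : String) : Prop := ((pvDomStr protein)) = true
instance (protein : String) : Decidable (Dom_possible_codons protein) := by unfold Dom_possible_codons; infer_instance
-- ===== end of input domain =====

-- B replaces A's per-character rescan of the 64-entry codon table with a hard-coded
-- reverse table (amino acid -> its codons, in the original table's order) and a single
-- lookup per character; return values are identical.

-- ===== PORT A =====
-- A's dict literal 'amino_acids' has 64 distinct keys, so its items() iterate exactly this list in order.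
def aminoAcidsA : List (String × String) :=
  [("AUA","I"), ("AUC","I"), ("AUU","I"), ("AUG","M"),
   ("ACA","T"), ("ACC","T"), ("ACG","T"), ("ACU","T"),
   ("AAC","N"), ("AAU","N"), ("AAA","K"), ("AAG","K"),
   ("AGC","S"), ("AGU","S"), ("AGA","R"), ("AGG","R"),
   ("CUA","L"), ("CUC","L"), ("CUG","L"), ("CUU","L"),
   ("CCA","P"), ("CCC","P"), ("CCG","P"), ("CCU","P"),
   ("CAC","H"), ("CAU","H"), ("CAA","Q"), ("CAG","Q"),
   ("CGA","R"), ("CGC","R"), ("CGG","R"), ("CGU","R"),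
   ("GUA","V"), ("GUC","V"), ("GUG","V"), ("GUU","V"),
   ("GCA","A"), ("GCC","A"), ("GCG","A"), ("GCU","A"),
   ("GAC","D"), ("GAU","D"), ("GAA","E"), ("GAG","E"),
   ("GGA","G"), ("GGC","G"), ("GGG","G"), ("GGU","G"),
   ("UCA","S"), ("UCC","S"), ("UCG","S"), ("UCU","S"),
   ("UUC","F"), ("UUU","F"), ("UUA","L"), ("UUG","L"),
   ("UAC","Y"), ("UAU","Y"), ("UAA",""), ("UAG",""),
   ("UGC","C"), ("UGU","C"), ("UGA",""), ("UGG","W")]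

-- outer loop over the protein's characters; inner loop over items(), appending matching codons
def possible_codons (protein : String) : List String :=
  protein.toList.foldl
    (fun acc aa =>
      aminoAcidsA.foldl
        (fun acc kv => if kv.2 == String.ofList [aa] then acc ++ [kv.1] else acc) acc)
    []

-- ===== PORT B =====
-- Source B's module-level CODONS_FOR dict (21 distinct keys, in insertion order)
def codonsFor : PySem.Dict String (List String) :=
  PySem.Dict.ofList
    [("I", ["AUA", "AUC", "AUU"]), ("M", ["AUG"]),
     ("T", ["ACA", "ACC", "ACG", "ACU"]), ("N", ["AAC", "AAU"]),
     ("K", ["AAA", "AAG"]), ("S", ["AGC", "AGU", "UCA", "UCC", "UCG", "UCU"]),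
     ("R", ["AGA", "AGG", "CGA", "CGC", "CGG", "CGU"]),
     ("L", ["CUA", "CUC", "CUG", "CUU", "UUA", "UUG"]),
     ("P", ["CCA", "CCC", "CCG", "CCU"]), ("H", ["CAC", "CAU"]),
     ("Q", ["CAA", "CAG"]), ("V", ["GUA", "GUC", "GUG", "GUU"]),
     ("A", ["GCA", "GCC", "GCG", "GCU"]), ("D", ["GAC", "GAU"]),
     ("E", ["GAA", "GAG"]), ("G", ["GGA", "GGC", "GGG", "GGU"]),
     ("F", ["UUC", "UUU"]), ("Y", ["UAC", "UAU"]),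
     ("C", ["UGC", "UGU"]), ("W", ["UGG"])]

-- '[codon for aa in protein for codon in CODONS_FOR.get(aa, [])]'
def possible_codons_alt (protein : String) : List String :=
  protein.toList.flatMap (fun aa => codonsFor.getD (String.ofList [aa]) [])

-- ===== PRECONDITION & SPEC =====
def Spec_possible_codons (protein : String) (out : List String) : Prop := out = possible_codons_alt protein
instance (protein : String) (out : List String) : Decidable (Spec_possible_codons protein out) := by unfold Spec_possible_codons; infer_instance

-- ===== CLAIM (what is proved, stated in full; the proofs are below) =====
def Claim_equal_possible_codons : Prop := ∀ (protein : String), Dom_possible_codons protein → Spec_possible_codons protein (possible_codons protein)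

-- ===== LEMMAS AND PROOFS =====

set_option maxRecDepth 40000 in
-- what A collects for one character = what B looks up for it (for every single-char string)
lemma perChar (s : String) (hne : s ≠ "") :
    (aminoAcidsA.filter (fun kv => kv.2 == s)).map (·.1) = codonsFor.getD s [] := by
  by_cases hI : s = "I"; · subst hI; decide
  by_cases hM : s = "M"; · subst hM; decide
  by_cases hT : s = "T"; · subst hT; decide
  by_cases hN : s = "N"; · subst hN; decide
  by_cases hK : s = "K"; · subst hK; decide
  by_cases hS : s = "S"; · subst hS; decide
  by_cases hR : s = "R"; · subst hR; decide
  by_cases hL : s = "L"; · subst hL; decide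
  by_cases hP : s = "P"; · subst hP; decide
  by_cases hH : s = "H"; · subst hH; decide
  by_cases hQ : s = "Q"; · subst hQ; decide
  by_cases hV : s = "V"; · subst hV; decide
  by_cases hA : s = "A"; · subst hA; decide
  by_cases hD : s = "D"; · subst hD; decide
  by_cases hE : s = "E"; · subst hE; decide
  by_cases hG : s = "G"; · subst hG; decide
  by_cases hF : s = "F"; · subst hF; decide
  by_cases hY : s = "Y"; · subst hY; decide
  by_cases hC : s = "C"; · subst hC; decide
  by_cases hW : s = "W"; · subst hW; decide
  have eI : (("I" : String) == s) = false := beq_eq_false_iff_ne.mpr (Ne.symm hI)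
  have eM : (("M" : String) == s) = false := beq_eq_false_iff_ne.mpr (Ne.symm hM)
  have eT : (("T" : String) == s) = false := beq_eq_false_iff_ne.mpr (Ne.symm hT)
  have eN : (("N" : String) == s) = false := beq_eq_false_iff_ne.mpr (Ne.symm hN)
  have eK : (("K" : String) == s) = false := beq_eq_false_iff_ne.mpr (Ne.symm hK)
  have eS : (("S" : String) == s) = false := beq_eq_false_iff_ne.mpr (Ne.symm hS)
  have eR : (("R" : String) == s) = false := beq_eq_false_iff_ne.mpr (Ne.symm hR)
  have eL : (("L" : String) == s) = false := beq_eq_false_iff_ne.mpr (Ne.symm hL)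
  have eP : (("P" : String) == s) = false := beq_eq_false_iff_ne.mpr (Ne.symm hP)
  have eH : (("H" : String) == s) = false := beq_eq_false_iff_ne.mpr (Ne.symm hH)
  have eQ : (("Q" : String) == s) = false := beq_eq_false_iff_ne.mpr (Ne.symm hQ)
  have eV : (("V" : String) == s) = false := beq_eq_false_iff_ne.mpr (Ne.symm hV)
  have eA : (("A" : String) == s) = false := beq_eq_false_iff_ne.mpr (Ne.symm hA)
  have eD : (("D" : String) == s) = false := beq_eq_false_iff_ne.mpr (Ne.symm hD)
  have eE : (("E" : String) == s) = false := beq_eq_false_iff_ne.mpr (Ne.symm hE)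
  have eG : (("G" : String) == s) = false := beq_eq_false_iff_ne.mpr (Ne.symm hG)
  have eF : (("F" : String) == s) = false := beq_eq_false_iff_ne.mpr (Ne.symm hF)
  have eY : (("Y" : String) == s) = false := beq_eq_false_iff_ne.mpr (Ne.symm hY)
  have eC : (("C" : String) == s) = false := beq_eq_false_iff_ne.mpr (Ne.symm hC)
  have eW : (("W" : String) == s) = false := beq_eq_false_iff_ne.mpr (Ne.symm hW)
  have ene : (("" : String) == s) = false := beq_eq_false_iff_ne.mpr (Ne.symm hne)
  simp [aminoAcidsA, codonsFor, PySem.Dict.ofList, PySem.Dict.update, List.foldl, PySem.Dict.getD_insert,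
        PySem.Dict.getD_empty, List.filter,
        eI, eM, eT, eN, eK, eS, eR, eL, eP, eH, eQ, eV, eA, eD, eE, eG, eF, eY, eC, eW, ene,
        hI, hM, hT, hN, hK, hS, hR, hL, hP, hH, hQ, hV, hA, hD, hE, hG, hF, hY, hC, hW]

lemma ofList_single_ne_empty (c : Char) : String.ofList [c] ≠ "" := by
  intro h
  have := congrArg String.toList h
  simp at this

-- ===== VERDICT (by name: the statement is the Claim_ definition above) =====
theorem possible_codons_spec : Claim_equal_possible_codons := by
  intro protein _
  unfold Spec_possible_codons possible_codons possible_codons_alt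
  have h : (fun (acc : List String) (aa : Char) =>
      aminoAcidsA.foldl (fun acc kv => if kv.2 == String.ofList [aa] then acc ++ [kv.1] else acc) acc)
      = fun acc aa => acc ++ ((aminoAcidsA.filter (fun kv => kv.2 == String.ofList [aa])).map (·.1)) := by
    funext acc aa
    exact PySem.List.foldl_append_if _ _ _ _
  rw [h, PySem.List.foldl_append_eq_flatMap]
  rw [List.nil_append]
  congr 1
  funext aa
  exact perChar _ (ofList_single_ne_empty aa)
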